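-- pv_equiv track=rewrite | github.com/haykminasyan-devAI/metric | scraper/clean_data.py | remove_duplicate_blocks
-- ===== SOURCE A (Python) =====
-- def remove_duplicate_blocks(lines: list[str]) -> list[str]:
--     """
--     Remove duplicate paragraph blocks. A block is consecutive non-empty lines
--     separated by blank lines. Keep only the first occurrence of each block.
--     """
--     blocks: list[list[str]] = []
--     current: list[str] = []
--
--     for line in lines:
--         if line.strip() == "":
--             blocks.append(current)
--             blocks.append([])  # blank separator
--             current = []
--         else:
--             current.append(line)
--     if current:
--         blocks.append(current)
--
--     seen: set[str] = set()
--     result: list[str] = []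
--
--     for block in blocks:
--         if not block:           # blank separator
--             result.append("")
--             continue
--         key = "\n".join(b.strip() for b in block)
--         if key in seen:
--             continue
--         seen.add(key)
--         result.extend(block)
--         result.append("")
--
--     # Strip trailing blanks
--     while result and result[-1] == "":
--         result.pop()
--     return result
-- ===== SOURCE B (Python) =====
-- def remove_duplicate_blocks(lines: list[str]) -> list[str]:
--     """Single pass: no intermediate `blocks` list; each run of non-empty lines
--     is flushed (emitted once, deduplicated by stripped-join key) as soon as it ends."""
--     seen: set[str] = set()
--     result: list[str] = []
--     current: list[str] = []
--
--     def flush():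
--         if not current:
--             result.append("")
--             return
--         key = "\n".join(l.strip() for l in current)
--         if key not in seen:
--             seen.add(key)
--             result.extend(current)
--             result.append("")
--
--     for line in lines:
--         if line.strip() == "":
--             flush()
--             result.append("")  # blank separator
--             current.clear()
--         else:
--             current.append(line)
--     if current:
--         flush()
--
--     while result and result[-1] == "":
--         result.pop()
--     return result
-- ===== Notes on version B (the rewrite author's own statement) =====
-- stated objective: simpler
-- what changed: B fuses A's two phases into a single pass that deduplicates each run of non-empty lines as soon as it ends, never materialising the intermediate list of blocks.
import Mathlib
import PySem

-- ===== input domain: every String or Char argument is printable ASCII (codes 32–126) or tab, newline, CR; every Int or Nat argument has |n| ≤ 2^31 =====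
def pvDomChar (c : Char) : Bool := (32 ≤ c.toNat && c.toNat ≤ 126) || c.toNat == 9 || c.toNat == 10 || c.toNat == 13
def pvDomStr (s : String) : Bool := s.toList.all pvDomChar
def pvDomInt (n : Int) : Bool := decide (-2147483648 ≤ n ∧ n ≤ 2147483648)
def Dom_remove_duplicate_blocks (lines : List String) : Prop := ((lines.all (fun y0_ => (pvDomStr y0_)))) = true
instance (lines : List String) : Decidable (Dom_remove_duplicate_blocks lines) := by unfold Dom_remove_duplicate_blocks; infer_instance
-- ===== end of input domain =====

-- B fuses A's two phases (build blocks list, then dedup) into one pass that flushes each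
-- run of non-empty lines as it ends; same cost, simpler structure, no intermediate list.


-- ===== PORT A =====
-- shared helper: the trailing `while result and result[-1] == "": result.pop()` loop of both Pythons
def rdbPopTrailing : List String → List String
  | [] => []
  | x :: xs =>
    match rdbPopTrailing xs with
    | [] => if x == "" then [] else [x]
    | r => x :: r

def remove_duplicate_blocks (lines : List String) : List String :=
  -- phase 1: build the list of blocks
  let p1 := lines.foldl
    (fun (st : List (List String) × List String) line =>
      if PySem.Str.strip line == "" then (st.1 ++ [st.2, []], [])
      else (st.1, st.2 ++ [line]))
    ([], [])
  let blocks := if p1.2 ≠ [] then p1.1 ++ [p1.2] else p1.1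
  -- phase 2: consume the blocks, deduplicating
  let p2 := blocks.foldl
    (fun (st : PySem.Set String × List String) block =>
      if block.isEmpty then (st.1, st.2 ++ [""])
      else
        let key := PySem.Str.join "\n" (block.map PySem.Str.strip)
        if st.1.contains key then st
        else (PySem.Set.add st.1 key, st.2 ++ block ++ [""]))
    (PySem.Set.empty, [])
  rdbPopTrailing p2.2

-- ===== PORT B =====
-- Source B's `flush()`: emit the finished run `current` into (seen, result)
def rdbFlush (seen : PySem.Set String) (result current : List String) :
    PySem.Set String × List String :=
  if current.isEmpty then (seen, result ++ [""])
  else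
    let key := PySem.Str.join "\n" (current.map PySem.Str.strip)
    if seen.contains key then (seen, result)
    else (PySem.Set.add seen key, result ++ current ++ [""])

-- Source B's main loop: one pass over `lines`, no blocks list
def rdbLoop : List String → PySem.Set String → List String → List String →
    (PySem.Set String × List String) × List String
  | [], seen, result, current => ((seen, result), current)
  | l :: ls, seen, result, current =>
    if PySem.Str.strip l == "" then
      let st := rdbFlush seen result current
      rdbLoop ls st.1 (st.2 ++ [""]) []
    else rdbLoop ls seen result (current ++ [l])

def remove_duplicate_blocks_alt (lines : List String) : List String :=
  let st := rdbLoop lines PySem.Set.empty [] []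
  let result := if st.2.isEmpty then st.1.2 else (rdbFlush st.1.1 st.1.2 st.2).2
  rdbPopTrailing result

-- ===== PRECONDITION & SPEC =====
def Spec_remove_duplicate_blocks (lines : List String) (out : List String) : Prop := out = remove_duplicate_blocks_alt lines
instance (lines : List String) (out : List String) : Decidable (Spec_remove_duplicate_blocks lines out) := by unfold Spec_remove_duplicate_blocks; infer_instance

-- ===== CLAIM (what is proved, stated in full; the proofs are below) =====
def Claim_equal_remove_duplicate_blocks : Prop := ∀ (lines : List String), Dom_remove_duplicate_blocks lines → Spec_remove_duplicate_blocks lines (remove_duplicate_blocks lines)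

-- ===== LEMMAS AND PROOFS =====

-- named forms of the two fold steps of port A (definitionally equal to the lambdas in the port)
def rdbStep1 (st : List (List String) × List String) (line : String) :
    List (List String) × List String :=
  if PySem.Str.strip line == "" then (st.1 ++ [st.2, []], []) else (st.1, st.2 ++ [line])

def rdbStep2 (st : PySem.Set String × List String) (block : List String) :
    PySem.Set String × List String :=
  if block.isEmpty then (st.1, st.2 ++ [""])
  else
    let key := PySem.Str.join "\n" (block.map PySem.Str.strip)
    if st.1.contains key then st
    else (PySem.Set.add st.1 key, st.2 ++ block ++ [""])

theorem rdbStep2_eq_flush (seen : PySem.Set String) (result block : List String) :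
    rdbStep2 (seen, result) block = rdbFlush seen result block := rfl

-- phase 1 only appends to the blocks component
theorem rdbStep1_blocks_append (ls : List String) (bs : List (List String)) (c : List String) :
    ls.foldl rdbStep1 (bs, c)
      = (bs ++ (ls.foldl rdbStep1 ([], c)).1, (ls.foldl rdbStep1 ([], c)).2) := by
  induction ls generalizing bs c with
  | nil => simp
  | cons l ls ih =>
    simp only [List.foldl_cons, rdbStep1]
    by_cases h : PySem.Str.strip l == ""
    · simp only [h, if_pos, List.nil_append]
      rw [ih (bs ++ [c, []]) [], ih [c, []] []]
      simp
    · simp only [h, if_neg, Bool.false_eq_true, not_false_iff]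
      exact ih bs (c ++ [l])

-- the single pass of B computes phase 2 of A applied to phase 1 of A
theorem rdbLoop_eq (ls : List String) (seen : PySem.Set String) (result current : List String) :
    rdbLoop ls seen result current
      = ((ls.foldl rdbStep1 ([], current)).1.foldl rdbStep2 (seen, result),
         (ls.foldl rdbStep1 ([], current)).2) := by
  induction ls generalizing seen result current with
  | nil => rfl
  | cons l ls ih =>
    simp only [rdbLoop, List.foldl_cons, rdbStep1]
    by_cases h : PySem.Str.strip l == ""
    · simp only [h, if_pos, List.nil_append]
      rw [ih, rdbStep1_blocks_append ls [current, []] []]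
      rw [List.foldl_append]
      rfl
    · simp only [h, if_neg, Bool.false_eq_true, not_false_iff]
      exact ih seen result (current ++ [l])

-- ===== VERDICT (by name: the statement is the Claim_ definition above) =====
theorem remove_duplicate_blocks_spec : Claim_equal_remove_duplicate_blocks := by
  intro lines _
  show remove_duplicate_blocks lines = remove_duplicate_blocks_alt lines
  unfold remove_duplicate_blocks remove_duplicate_blocks_alt
  show rdbPopTrailing _ = rdbPopTrailing _
  rw [show (fun (st : List (List String) × List String) line =>
        if PySem.Str.strip line == "" then (st.1 ++ [st.2, []], []) else (st.1, st.2 ++ [line]))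
      = rdbStep1 from rfl]
  rw [show (fun (st : PySem.Set String × List String) block =>
        if block.isEmpty then (st.1, st.2 ++ [""])
        else
          let key := PySem.Str.join "\n" (block.map PySem.Str.strip)
          if st.1.contains key then st
          else (PySem.Set.add st.1 key, st.2 ++ block ++ [""]))
      = rdbStep2 from rfl]
  rw [rdbLoop_eq]
  set p1 := lines.foldl rdbStep1 ([], [])
  by_cases h : p1.2 = []
  · simp [h]
  · simp only [h, if_pos, ne_eq, not_false_iff]
    rw [List.foldl_append]
    simp only [List.foldl_cons, List.foldl_nil]
    rw [show p1.1.foldl rdbStep2 (PySem.Set.empty, [])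
        = ((p1.1.foldl rdbStep2 (PySem.Set.empty, [])).1,
           (p1.1.foldl rdbStep2 (PySem.Set.empty, [])).2) from rfl,
       rdbStep2_eq_flush]
    simp [List.isEmpty_iff, h]
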